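-- pv_equiv track=rewrite | github.com/maycehoang-projects/2048 | 2048.py | shift_and_combine
-- ===== SOURCE A (Python) =====
-- def shift_and_combine(line):
--     """Shifts numbers right and combines identical numbers."""
--     new_line = [num for num in line if num != 0]  # Remove zeros
--     for i in range(len(new_line) - 1, 0, -1):
--         if new_line[i] == new_line[i - 1]:  # Combine identical tiles
--             new_line[i] *= 2
--             new_line[i - 1] = 0
--     new_line = [num for num in new_line if num != 0]  # Remove zeros again
--     return [0] * (4 - len(new_line)) + new_line  # Pad with zeros
-- ===== SOURCE B (Python) =====
-- def shift_and_combine(line):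
--     """Shifts numbers right and combines identical numbers."""
--     nums = [n for n in line if n != 0]
--     merged = []
--     i = len(nums) - 1
--     while i >= 0:
--         if i > 0 and nums[i] == nums[i - 1]:
--             merged.append(nums[i] * 2)
--             i -= 2
--         else:
--             merged.append(nums[i])
--             i -= 1
--     merged.reverse()
--     return [0] * (4 - len(merged)) + merged
-- ===== Notes on version B (the rewrite author's own statement) =====
-- stated objective: simpler
-- what changed: B replaces A's in-place mark-with-zeros index loop followed by a second zero-filter with a single right-to-left walk that builds the merged list directly (consuming two tiles on a merge, one otherwise), then pads.
import Mathlib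
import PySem

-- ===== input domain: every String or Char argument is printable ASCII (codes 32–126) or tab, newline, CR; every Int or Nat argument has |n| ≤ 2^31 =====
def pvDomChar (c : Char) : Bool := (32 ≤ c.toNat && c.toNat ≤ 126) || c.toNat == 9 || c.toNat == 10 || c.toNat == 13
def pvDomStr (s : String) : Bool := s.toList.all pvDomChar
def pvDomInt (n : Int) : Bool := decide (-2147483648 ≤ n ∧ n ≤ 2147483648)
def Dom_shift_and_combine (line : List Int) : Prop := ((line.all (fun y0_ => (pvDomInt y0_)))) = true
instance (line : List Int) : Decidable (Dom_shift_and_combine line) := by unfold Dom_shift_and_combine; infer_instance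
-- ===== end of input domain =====

-- B rebuilds the merged line in one reverse pass with slice-style recursion instead of A's
-- mark-in-place index loop followed by a second zero-filter (objective: simpler decomposition).

-- ===== PORT A =====
-- the loop body of A ('if new_line[i]==new_line[i-1]: new_line[i]*=2; new_line[i-1]=0');
-- every index visited is in range, so pyGetD/pySetD are exact here
def sacStep (st : List Int) (i : Int) : List Int :=
  if PySem.List.pyGetD st i 0 = PySem.List.pyGetD st (i - 1) 0 then
    let st2 := PySem.List.pySetD st i (PySem.List.pyGetD st i 0 * 2)
    PySem.List.pySetD st2 (i - 1) 0
  else st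

def shift_and_combine (line : List Int) : List Int :=
  let new_line := line.filter (fun num => num != 0)
  let new_line2 := (PySem.List.pyRange ((new_line.length : Int) - 1) 0 (-1)).foldl sacStep new_line
  let new_line3 := new_line2.filter (fun num => num != 0)
  List.replicate (4 - new_line3.length) 0 ++ new_line3

-- ===== PORT B =====
-- the while loop 'while i >= 0: …', counter k = i + 1 (so k = 0 ⟹ i = -1, loop ends);
-- every index read is in range, so pyGetD is exact here
def sacWalk (nums : List Int) (merged : List Int) : Nat → List Int
  | 0 => merged
  | k + 1 =>
      if 1 ≤ k ∧ PySem.List.pyGetD nums (k : Int) 0 = PySem.List.pyGetD nums ((k : Int) - 1) 0 then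
        sacWalk nums (merged ++ [PySem.List.pyGetD nums (k : Int) 0 * 2]) (k - 1)
      else
        sacWalk nums (merged ++ [PySem.List.pyGetD nums (k : Int) 0]) k

def shift_and_combine_alt (line : List Int) : List Int :=
  let nums := line.filter (fun n => n != 0)
  let merged := sacWalk nums [] nums.length
  let m := merged.reverse
  List.replicate (4 - m.length) 0 ++ m

-- ===== PRECONDITION & SPEC =====
def Spec_shift_and_combine (line : List Int) (out : List Int) : Prop := out = shift_and_combine_alt line
instance (line : List Int) (out : List Int) : Decidable (Spec_shift_and_combine line out) := by unfold Spec_shift_and_combine; infer_instance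

-- ===== CLAIM (what is proved, stated in full; the proofs are below) =====
def Claim_equal_shift_and_combine : Prop := ∀ (line : List Int), Dom_shift_and_combine line → Spec_shift_and_combine line (shift_and_combine line)

-- ===== LEMMAS AND PROOFS =====

-- the reverse-pass merge as structural recursion on the reversed list (proof-side view of sacWalk)
def sacBuild (merged : List Int) : List Int → List Int
  | [] => merged
  | [a] => merged ++ [a]
  | a :: b :: t =>
      if a = b then sacBuild (merged ++ [a * 2]) t
      else sacBuild (merged ++ [a]) (b :: t)

-- A's loop result on the reversed nonzero list, marked with 0 at merged-away slots
def sacMark : List Int → List Int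
  | [] => []
  | [a] => [a]
  | a :: b :: t => if a = b then a * 2 :: 0 :: sacMark t else a :: sacMark (b :: t)

-- A's loop as a count-down recursion on the highest index
def sacG (st : List Int) : Nat → List Int
  | 0 => st
  | k + 1 => sacG (sacStep st ((k : Int) + 1)) k

theorem pyRange_countdown_cons (k : Nat) :
    PySem.List.pyRange ((k : Int) + 1) 0 (-1) = ((k : Int) + 1) :: PySem.List.pyRange (k : Int) 0 (-1) := by
  rw [PySem.List.pyRange_neg_one, PySem.List.pyRange_neg_one]
  have h1 : (((k : Int) + 1) - 0).toNat = k + 1 := by omega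
  have h2 : ((k : Int) - 0).toNat = k := by omega
  rw [h1, h2, List.range_succ_eq_map]
  simp [List.map_map, Function.comp]

theorem foldl_eq_sacG (k : Nat) (st : List Int) :
    (PySem.List.pyRange (k : Int) 0 (-1)).foldl sacStep st = sacG st k := by
  induction k generalizing st with
  | zero => simp [sacG]
  | succ m ih =>
      have hc : ((m + 1 : Nat) : Int) = (m : Int) + 1 := by omega
      rw [hc, pyRange_countdown_cons]
      simp only [List.foldl_cons]
      rw [ih]
      rfl

-- the step at the top pair: merge or leave
theorem sacStep_top (p : List Int) (b a : Int) :
    sacStep (p ++ [b, a]) ((p.length : Int) + 1) =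
      if a = b then p ++ [0, a * 2] else p ++ [b, a] := by
  have e2 : ((p.length : Int) + 1 - 1) = ((p.length : Nat) : Int) := by omega
  have e1 : ((p.length : Int) + 1) = ((p.length + 1 : Nat) : Int) := by omega
  have hget1 : PySem.List.pyGetD (p ++ [b, a]) ((p.length : Int) + 1) 0 = a := by
    rw [e1, PySem.List.pyGetD_natCast]
    rw [List.getD_eq_getElem?_getD, List.getElem?_append_right (by omega)]
    simp
  have hget0 : PySem.List.pyGetD (p ++ [b, a]) ((p.length : Int) + 1 - 1) 0 = b := by
    rw [e2, PySem.List.pyGetD_natCast]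
    rw [List.getD_eq_getElem?_getD, List.getElem?_append_right (by omega)]
    simp
  unfold sacStep
  rw [hget1, hget0]
  by_cases h : a = b
  · simp only [if_pos h]
    rw [e2, e1, PySem.List.pySetD_natCast, PySem.List.pySetD_natCast]
    rw [List.set_append_right _ _ (by omega), List.set_append_right _ _ (by omega)]
    simp
  · simp [h]

-- the step never touches indices above i; pushing an appended tail through sacG
theorem sacStep_append (st : List Int) (c : Int) (n : Nat)
    (h0 : 1 ≤ n) (h1 : n < st.length) :
    sacStep (st ++ [c]) (n : Int) = sacStep st (n : Int) ++ [c] := by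
  have hget : ∀ j : Nat, j < st.length →
      PySem.List.pyGetD (st ++ [c]) (j : Int) 0 = PySem.List.pyGetD st (j : Int) 0 := by
    intro j hj
    rw [PySem.List.pyGetD_natCast, PySem.List.pyGetD_natCast,
        List.getD_eq_getElem?_getD, List.getD_eq_getElem?_getD,
        List.getElem?_append_left hj]
  have hcast : ((n : Int) - 1) = ((n - 1 : Nat) : Int) := by omega
  unfold sacStep
  rw [hcast, hget n h1, hget (n - 1) (by omega)]
  by_cases h : PySem.List.pyGetD st (n : Int) 0 = PySem.List.pyGetD st ((n - 1 : Nat) : Int) 0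
  · simp only [if_pos h]
    rw [PySem.List.pySetD_natCast, PySem.List.pySetD_natCast,
        PySem.List.pySetD_natCast, PySem.List.pySetD_natCast]
    rw [List.set_append_left _ _ (by omega),
        List.set_append_left _ _ (by simp only [List.length_set]; omega)]
  · simp only [if_neg h]

theorem length_sacStep (st : List Int) (i : Int) : (sacStep st i).length = st.length := by
  unfold sacStep
  split <;> simp [PySem.List.length_pySetD]

theorem sacG_append (st : List Int) (c : Int) (k : Nat) (h : k < st.length) :
    sacG (st ++ [c]) k = sacG st k ++ [c] := by
  induction k generalizing st with
  | zero => rfl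
  | succ m ih =>
      show sacG (sacStep (st ++ [c]) ((m : Int) + 1)) m = sacG (sacStep st ((m : Int) + 1)) m ++ [c]
      have hc1 : ((m : Int) + 1) = ((m + 1 : Nat) : Int) := by omega
      rw [hc1, sacStep_append st c (m + 1) (by omega) (by omega)]
      apply ih
      rw [length_sacStep]
      omega

-- MAIN loop characterisation: A's loop on the reversal of r realises sacMark r
theorem sacG_eq_sacMark (r : List Int) (hnz : ∀ x ∈ r, x ≠ 0) :
    sacG r.reverse (r.length - 1) = (sacMark r).reverse := by
  induction r using sacMark.induct with
  | case1 => rfl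
  | case2 a => rfl
  | case3 b t ih =>
      have hlen : (b :: b :: t).length - 1 = t.length + 1 := by simp
      rw [hlen]
      have hrev : (b :: b :: t).reverse = t.reverse ++ [b, b] := by simp
      rw [hrev]
      show sacG (sacStep (t.reverse ++ [b, b]) ((t.length : Int) + 1)) (t.length) = _
      have hlr : (t.reverse.length : Int) = (t.length : Int) := by simp
      rw [← hlr, sacStep_top, if_pos rfl]
      have hsplit : t.reverse ++ [0, b * 2] = (t.reverse ++ [0]) ++ [b * 2] := by simp
      rw [hsplit, sacG_append _ _ _ (by simp)]
      have hbase : sacG (t.reverse ++ [0]) t.length = (sacMark t).reverse ++ [0] := by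
        cases ht : t with
        | nil => subst ht; rfl
        | cons c s =>
          subst ht
          have hlen2 : (c :: s).length = s.length + 1 := rfl
          rw [hlen2]
          have hrev2 : (c :: s).reverse ++ [0] = (s.reverse ++ [c]) ++ [0] := by simp
          rw [hrev2]
          show sacG (sacStep ((s.reverse ++ [c]) ++ [0]) ((s.length : Int) + 1)) s.length = _
          have h1 : ((s.reverse ++ [c]) ++ [0]) = s.reverse ++ [c, 0] := by simp
          have hlr2 : (s.reverse.length : Int) = (s.length : Int) := by simp
          rw [h1, ← hlr2, sacStep_top]
          have hc : ¬ ((0 : Int) = c) := fun h => (hnz c (by simp) h.symm).elim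
          rw [if_neg hc, ← h1]
          rw [sacG_append _ _ _ (by simp)]
          have ihv : sacG (c :: s).reverse ((c :: s).length - 1) = (sacMark (c :: s)).reverse := by
            apply ih
            intro x hx
            exact hnz x (by simp at hx ⊢; tauto)
          simp only [List.reverse_cons] at ihv
          rw [hlen2] at ihv
          simp only [Nat.add_sub_cancel] at ihv
          rw [ihv]
      rw [hbase]
      have hm : sacMark (b :: b :: t) = b * 2 :: 0 :: sacMark t := by
        rw [sacMark]; simp
      rw [hm]
      simp
  | case4 a b t hab ih =>
      have hlen : (a :: b :: t).length - 1 = t.length + 1 := by simp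
      rw [hlen]
      have hrev : (a :: b :: t).reverse = t.reverse ++ [b, a] := by simp
      rw [hrev]
      show sacG (sacStep (t.reverse ++ [b, a]) ((t.length : Int) + 1)) (t.length) = _
      have hlr : (t.reverse.length : Int) = (t.length : Int) := by simp
      rw [← hlr, sacStep_top, if_neg hab]
      have hsplit : t.reverse ++ [b, a] = (t.reverse ++ [b]) ++ [a] := by simp
      rw [hsplit, sacG_append _ _ _ (by simp)]
      have ihv : sacG (b :: t).reverse ((b :: t).length - 1) = (sacMark (b :: t)).reverse := by
        apply ih
        intro x hx
        exact hnz x (by simp at hx ⊢; tauto)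
      simp only [List.reverse_cons] at ihv
      have hl2 : (b :: t).length - 1 = t.length := by simp
      rw [hl2] at ihv
      rw [ihv]
      have hm : sacMark (a :: b :: t) = a :: sacMark (b :: t) := by
        rw [sacMark]; simp [hab]
      rw [hm]
      simp

-- B's builder with accumulator = filtered sacMark
theorem sacBuild_eq_mark_filter (r : List Int) (hnz : ∀ x ∈ r, x ≠ 0) (acc : List Int) :
    sacBuild acc r = acc ++ (sacMark r).filter (fun n => n != 0) := by
  induction r using sacMark.induct generalizing acc with
  | case1 => simp [sacBuild, sacMark]
  | case2 a =>
      have ha : a ≠ 0 := hnz a (by simp)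
      simp [sacBuild, sacMark, ha]
  | case3 b t ih =>
      have hb : b ≠ 0 := hnz b (by simp)
      have h2b : b * 2 ≠ 0 := by intro h; exact hb (by omega)
      rw [sacBuild, sacMark]
      rw [ih (fun x hx => hnz x (by simp at hx ⊢; tauto))]
      simp [h2b]
  | case4 a b t hab ih =>
      have ha : a ≠ 0 := hnz a (by simp)
      rw [sacBuild, sacMark]
      simp only [if_neg hab]
      rw [ih (fun x hx => hnz x (by simp at hx ⊢; tauto))]
      simp [ha]

theorem filter_nonzero (line : List Int) : ∀ x ∈ line.filter (fun n => n != 0), x ≠ 0 := by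
  intro x hx
  have := List.of_mem_filter hx
  simpa using this

theorem pyGetD_nat (nums : List Int) (k : Nat) (h : k < nums.length) :
    PySem.List.pyGetD nums (k : Int) 0 = nums[k] := by
  rw [PySem.List.pyGetD_natCast, List.getD_eq_getElem?_getD, List.getElem?_eq_getElem h]
  rfl

theorem take_succ_reverse (nums : List Int) (k : Nat) (h : k < nums.length) :
    (nums.take (k + 1)).reverse = nums[k] :: (nums.take k).reverse := by
  rw [List.take_add_one, List.getElem?_eq_getElem h]
  simp

-- the index walk realises the structural reverse pass
theorem sacWalk_eq_sacBuild (nums : List Int) (k : Nat) (hk : k ≤ nums.length)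
    (merged : List Int) :
    sacWalk nums merged k = sacBuild merged (nums.take k).reverse := by
  induction k using Nat.strong_induction_on generalizing merged with
  | _ k ih =>
    match k with
    | 0 => simp [sacWalk, sacBuild]
    | n + 1 =>
      have hn : n < nums.length := by omega
      rw [sacWalk, take_succ_reverse nums n hn, pyGetD_nat nums n hn]
      match hn' : n with
      | 0 => simp [sacWalk, sacBuild]
      | m + 1 =>
          have hm : m < nums.length := by omega
          have hcast : ((m + 1 : Nat) : Int) - 1 = ((m : Nat) : Int) := by omega
          rw [hcast, pyGetD_nat nums m hm,
              take_succ_reverse nums m hm, sacBuild]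
          by_cases h : nums[m + 1] = nums[m]
          · rw [if_pos ⟨by omega, h⟩, if_pos h]
            simp only [Nat.add_sub_cancel]
            exact ih m (by omega) (by omega) _
          · rw [if_neg (by simp [h]), if_neg h]
            rw [ih (m + 1) (by omega) (by omega) _]
            rw [take_succ_reverse nums m hm]

-- the two pipelines agree on any zero-free line
theorem sac_core (l : List Int) (hnz : ∀ x ∈ l, x ≠ 0) :
    ((PySem.List.pyRange ((l.length : Int) - 1) 0 (-1)).foldl sacStep l).filter (fun n => n != 0)
      = (sacWalk l [] l.length).reverse := by
  have hnzr : ∀ x ∈ l.reverse, x ≠ 0 := fun x hx => hnz x (List.mem_reverse.mp hx)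
  have hB : (sacWalk l [] l.length).reverse = ((sacMark l.reverse).filter (fun n => n != 0)).reverse := by
    rw [sacWalk_eq_sacBuild l l.length le_rfl [], List.take_length,
        sacBuild_eq_mark_filter l.reverse hnzr []]
    simp
  have hA : (PySem.List.pyRange ((l.length : Int) - 1) 0 (-1)).foldl sacStep l
      = (sacMark l.reverse).reverse := by
    cases l with
    | nil => simp [sacMark]
    | cons c s =>
        have hnzr' : ∀ x ∈ (c :: s).reverse, x ≠ 0 := fun x hx => hnz x (List.mem_reverse.mp hx)
        have hlen : (((c :: s).length : Int) - 1) = ((s.length : Nat) : Int) := by simp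
        rw [hlen, foldl_eq_sacG]
        have hmain := sacG_eq_sacMark (c :: s).reverse hnzr'
        rw [List.reverse_reverse, List.length_reverse] at hmain
        have hlen2 : (c :: s).length - 1 = s.length := by simp
        rw [← hlen2, hmain]
  rw [hA, hB, List.filter_reverse]

-- ===== VERDICT (by name: the statement is the Claim_ definition above) =====
theorem shift_and_combine_spec : Claim_equal_shift_and_combine := by
  intro line _
  unfold Spec_shift_and_combine shift_and_combine shift_and_combine_alt
  have hcore := sac_core (line.filter (fun n => n != 0)) (filter_nonzero line)
  simp only [hcore]
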